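-- pv_equiv track=rewrite | github.com/vignesh-nv/CodeVita-Solutions-2019 | Round 2/User Id.py | Solution
-- ===== SOURCE A (Python) =====
-- def Solution(string, i,length, u, ans, r):
--     vowels = ['a','e', 'i', 'o', 'u']
--     if i>=len(string)-1 and u<r:
--         return 0
--     elif i>=len(string)-1 and u==r and length>=3:
--         return ans+1
--     elif i>=len(string)-1:
--         return 0
--     elif (string[i] not in vowels and string[i+1] not in vowels) and length>=3:
--         a1 = Solution(string,i+1,length+1,u,ans,r)
--         a2 = Solution(string,i+1,0,u+1,ans,r)
--         return a1+ a2
--     else: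
--         return Solution(string, i+1, length+1,u,ans,r)
-- ===== SOURCE B (Python) =====
-- def Solution(string, i, length, u, ans, r):
--     n = len(string)
--     vowels = ['a', 'e', 'i', 'o', 'u']
--     # forward DP over positions: dict mapping capped (length, u-r) state -> path count
--     states = {(min(length, 3), min(u - r, 1)): 1}
--     for j in range(i, n - 1):
--         nxt = {}
--         for (l, d), c in states.items():
--             k1 = (min(l + 1, 3), d)
--             nxt[k1] = nxt.get(k1, 0) + c
--             if l >= 3 and string[j] not in vowels and string[j + 1] not in vowels:
--                 k2 = (0, min(d + 1, 1))
--                 nxt[k2] = nxt.get(k2, 0) + c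
--         states = nxt
--     total = 0
--     for (l, d), c in states.items():
--         if l >= 3 and d == 0:
--             total += c
--     return (ans + 1) * total
-- ===== Notes on version B (the rewrite author's own statement) =====
-- stated objective: faster
-- what changed: Replaced the exponential branching recursion by a single forward dynamic-programming pass that keeps a dictionary of capped (segment-length, splits-used) states with path counts (length capped at 3 and u-r capped at 1, the only values the tests distinguish) and multiplies the accepting-state count by ans+1.
import Mathlib
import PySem

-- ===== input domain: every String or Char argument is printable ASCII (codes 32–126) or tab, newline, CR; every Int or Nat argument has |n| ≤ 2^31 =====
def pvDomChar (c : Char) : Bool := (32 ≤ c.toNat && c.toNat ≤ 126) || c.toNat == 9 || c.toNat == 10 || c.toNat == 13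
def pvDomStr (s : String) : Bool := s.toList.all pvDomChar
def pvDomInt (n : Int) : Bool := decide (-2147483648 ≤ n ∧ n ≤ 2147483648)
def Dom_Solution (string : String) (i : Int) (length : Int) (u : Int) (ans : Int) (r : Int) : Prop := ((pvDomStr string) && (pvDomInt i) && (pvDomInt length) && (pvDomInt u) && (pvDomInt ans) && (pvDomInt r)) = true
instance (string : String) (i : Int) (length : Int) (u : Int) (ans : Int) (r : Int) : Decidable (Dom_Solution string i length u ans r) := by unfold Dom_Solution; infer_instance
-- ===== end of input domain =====

-- B replaces A's exponential branching recursion by a linear forward DP over capped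
-- (segment-length, splits-used) states with path counts (objective: faster).

-- ===== PORT A =====
-- A's local 'vowels' list is inlined at its use sites
def Solution (string : String) (i : Int) (length : Int) (u : Int) (ans : Int) (r : Int) : Int :=
  if i ≥ PySem.Str.len string - 1 ∧ u < r then 0
  else if i ≥ PySem.Str.len string - 1 ∧ u = r ∧ length ≥ 3 then ans + 1
  else if h3 : i ≥ PySem.Str.len string - 1 then 0
  else
    match PySem.Str.pyGet? string i, PySem.Str.pyGet? string (i + 1) with
    | some c0, some c1 =>
        if (c0 ∉ (['a', 'e', 'i', 'o', 'u'] : List Char) ∧ c1 ∉ (['a', 'e', 'i', 'o', 'u'] : List Char)) ∧ length ≥ 3 then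
          Solution string (i + 1) (length + 1) u ans r + Solution string (i + 1) 0 (u + 1) ans r
        else
          Solution string (i + 1) (length + 1) u ans r
    | _, _ => 0  -- string[i] / string[i+1] raises IndexError here; excluded by Pre_Solution
termination_by (PySem.Str.len string - 1 - i).toNat
decreasing_by all_goals omega

-- ===== PORT B =====
-- B's local 'vowels' list is inlined at its use sites
-- the test 'string[j] not in vowels and string[j+1] not in vowels' (Option none = IndexError → false, excluded by Pre_)
def pvNV (string : String) (j : Int) : Bool :=
  match PySem.Str.pyGet? string j with
  | none => false
  | some c0 =>
    match PySem.Str.pyGet? string (j + 1) with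
    | none => false
    | some c1 => decide (c0 ∉ (['a', 'e', 'i', 'o', 'u'] : List Char)) && decide (c1 ∉ (['a', 'e', 'i', 'o', 'u'] : List Char))

-- one iteration of B's outer loop: redistribute every state's count to its successor state(s)
def pvStep (string : String) (j : Int) (st : PySem.Dict (Int × Int) Int) : PySem.Dict (Int × Int) Int :=
  st.items.foldl (fun nxt p =>
    let k1 : Int × Int := (min (p.1.1 + 1) 3, p.1.2)
    let nxt1 := nxt.insert k1 (nxt.getD k1 0 + p.2)
    if p.1.1 ≥ 3 ∧ pvNV string j = true then
      let k2 : Int × Int := (0, min (p.1.2 + 1) 1)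
      nxt1.insert k2 (nxt1.getD k2 0 + p.2)
    else nxt1) PySem.Dict.empty

def Solution_alt (string : String) (i : Int) (length : Int) (u : Int) (ans : Int) (r : Int) : Int :=
  (ans + 1) *
    ((PySem.List.pyRange i (PySem.Str.len string - 1) 1).foldl (fun st j => pvStep string j st)
        (PySem.Dict.empty.insert (min length 3, min (u - r) 1) 1)).items.foldl
      (fun t p => if p.1.1 ≥ 3 ∧ p.1.2 = 0 then t + p.2 else t) 0

-- ===== PRECONDITION & SPEC =====
-- Pre_ excludes exactly the inputs where A raises IndexError: i < -len(string) with i < len(string)-1.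
def Pre_Solution (string : String) (i : Int) (length : Int) (u : Int) (ans : Int) (r : Int) : Prop :=
  -(PySem.Str.len string) ≤ i ∨ PySem.Str.len string - 1 ≤ i
instance (string : String) (i : Int) (length : Int) (u : Int) (ans : Int) (r : Int) : Decidable (Pre_Solution string i length u ans r) := by unfold Pre_Solution; infer_instance

def pvWitness_Solution : String × Int × Int × Int × Int × Int := ("bcdfg", 0, 0, 0, 0, 1)

def Spec_Solution (string : String) (i : Int) (length : Int) (u : Int) (ans : Int) (r : Int) (out : Int) : Prop := out = Solution_alt string i length u ans r
instance (string : String) (i : Int) (length : Int) (u : Int) (ans : Int) (r : Int) (out : Int) : Decidable (Spec_Solution string i length u ans r out) := by unfold Spec_Solution; infer_instance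

-- ===== CLAIM (what is proved, stated in full; the proofs are below) =====
def Claim_equal_Solution : Prop := ∀ (string : String) (i : Int) (length : Int) (u : Int) (ans : Int) (r : Int), Dom_Solution string i length u ans r → Pre_Solution string i length u ans r → Spec_Solution string i length u ans r (Solution string i length u ans r)

-- ===== LEMMAS AND PROOFS =====

-- the common mathematical object both ports compute: the number of accepting completions
-- from position j in the capped state (l, d) (l = min(length,3), d = min(u-r,1))
def pvC (string : String) (j : Int) (l : Int) (d : Int) : Int :=
  if j ≥ PySem.Str.len string - 1 then (if l ≥ 3 ∧ d = 0 then 1 else 0)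
  else
    pvC string (j + 1) (min (l + 1) 3) d +
      (if l ≥ 3 ∧ pvNV string j = true then pvC string (j + 1) 0 (min (d + 1) 1) else 0)
termination_by (PySem.Str.len string - 1 - j).toNat
decreasing_by all_goals omega

theorem pvGetSome (s : String) (k : Int) (h1 : -(PySem.Str.len s) ≤ k) (h2 : k < PySem.Str.len s) :
    ∃ c, PySem.Str.pyGet? s k = some c := by
  cases h : PySem.Str.pyGet? s k with
  | some c => exact ⟨c, rfl⟩
  | none =>
    exfalso
    simp [PySem.Str.pyGet?_eq, PySem.List.pyGet?_eq_none_iff, PySem.Raise.InRange] at h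
    simp [PySem.Str.len_eq] at h1 h2
    omega

theorem pvA_eq_pvC (string : String) (i length u ans r : Int)
    (h : -(PySem.Str.len string) ≤ i ∨ PySem.Str.len string - 1 ≤ i) :
    Solution string i length u ans r = (ans + 1) * pvC string i (min length 3) (min (u - r) 1) := by
  by_cases hb : i ≥ PySem.Str.len string - 1
  · rw [Solution]
    conv_rhs => rw [pvC]
    rw [if_pos hb]
    split_ifs <;> first | (exfalso; omega) | ring
  · have hlo : -(PySem.Str.len string) ≤ i := by
      rcases h with h | h
      · exact h
      · omega
    obtain ⟨c0, hc0⟩ := pvGetSome string i hlo (by omega)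
    obtain ⟨c1, hc1⟩ := pvGetSome string (i + 1) (by omega) (by omega)
    have hnv : pvNV string i = (decide (c0 ∉ (['a', 'e', 'i', 'o', 'u'] : List Char)) && decide (c1 ∉ (['a', 'e', 'i', 'o', 'u'] : List Char))) := by
      unfold pvNV; rw [hc0, hc1]
    rw [Solution]
    rw [if_neg (fun h' => hb h'.1), if_neg (fun h' => hb h'.1), dif_neg hb]
    conv_rhs => rw [pvC]
    rw [if_neg hb, hnv]
    simp only [hc0, hc1]
    have e1 : min (min length 3 + 1) 3 = min (length + 1) 3 := by omega
    have e2 : min (min (u - r) 1 + 1) 1 = min (u + 1 - r) 1 := by omega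
    by_cases hcond : (c0 ∉ (['a', 'e', 'i', 'o', 'u'] : List Char) ∧ c1 ∉ (['a', 'e', 'i', 'o', 'u'] : List Char)) ∧ length ≥ 3
    · rw [if_pos hcond]
      rw [if_pos (show min length 3 ≥ 3 ∧ (decide (c0 ∉ (['a', 'e', 'i', 'o', 'u'] : List Char)) && decide (c1 ∉ (['a', 'e', 'i', 'o', 'u'] : List Char))) = true by
        refine ⟨by omega, by simp [hcond.1.1, hcond.1.2]⟩)]
      rw [pvA_eq_pvC string (i + 1) (length + 1) u ans r (Or.inl (by omega)),
          pvA_eq_pvC string (i + 1) 0 (u + 1) ans r (Or.inl (by omega))]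
      rw [e1, e2]
      have e3 : min (0 : Int) 3 = 0 := by omega
      rw [e3]
      ring
    · rw [if_neg hcond]
      rw [if_neg (show ¬(min length 3 ≥ 3 ∧ (decide (c0 ∉ (['a', 'e', 'i', 'o', 'u'] : List Char)) && decide (c1 ∉ (['a', 'e', 'i', 'o', 'u'] : List Char))) = true) by
        rintro ⟨hl, hv⟩
        simp only [Bool.and_eq_true, decide_eq_true_eq] at hv
        exact hcond ⟨⟨hv.1, hv.2⟩, by omega⟩)]
      rw [pvA_eq_pvC string (i + 1) (length + 1) u ans r (Or.inl (by omega))]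
      rw [e1, add_zero]
termination_by (PySem.Str.len string - 1 - i).toNat
decreasing_by all_goals omega

def pvWsum (l : List ((Int × Int) × Int)) (f : (Int × Int) → Int) : Int :=
  (l.map (fun p => p.2 * f p.1)).sum

theorem pvWsum_congr (l : List ((Int × Int) × Int)) (f g : (Int × Int) → Int)
    (h : ∀ key, f key = g key) : pvWsum l f = pvWsum l g := by
  unfold pvWsum
  congr 1
  apply List.map_congr_left
  intro p _
  simp only [h]

theorem pvWsum_map_update (l : List ((Int × Int) × Int)) (k : Int × Int) (v c : Int)
    (f : (Int × Int) → Int) (hnd : (l.map (·.1)).Nodup) (hmem : (k, v) ∈ l) :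
    pvWsum (l.map (fun p => if p.1 == k then (k, v + c) else p)) f = pvWsum l f + c * f k := by
  induction l with
  | nil => simp at hmem
  | cons p t ih =>
    simp only [List.map_cons, List.nodup_cons] at hnd
    by_cases hk : p.1 = k
    · have hv : p.2 = v := by
        rcases List.mem_cons.mp hmem with h | h
        · rw [← h]
        · exfalso; apply hnd.1; rw [hk]; exact List.mem_map.mpr ⟨(k, v), h, rfl⟩
      have ht : t.map (fun p => if p.1 == k then (k, v + c) else p) = t := by
        have h' : ∀ q ∈ t, (fun p => if p.1 == k then (k, v + c) else p) q = id q := by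
          intro q hq
          have hqk : ¬ q.1 = k := by
            intro e; apply hnd.1; rw [hk, ← e]; exact List.mem_map.mpr ⟨q, hq, rfl⟩
          simp [hqk]
        rw [List.map_congr_left h', List.map_id]
      simp only [List.map_cons, ht, hk, BEq.rfl, if_true]
      simp only [pvWsum, List.map_cons, List.sum_cons]
      rw [hv, ← hk]
      ring
    · have hmem' : (k, v) ∈ t := by
        rcases List.mem_cons.mp hmem with h | h
        · exact absurd (by rw [← h]) hk
        · exact h
      have h2 := ih hnd.2 hmem'
      simp only [pvWsum, List.map_cons, List.sum_cons] at h2 ⊢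
      simp only [show (p.1 == k) = false from by simp [hk], Bool.false_eq_true, if_false]
      linarith [h2]

theorem pvKeysNodup_map (d : PySem.Dict (Int × Int) Int) (h : d.keys.Nodup) :
    (d.items.map (·.1)).Nodup := h

theorem pvWsum_insert_add (d : PySem.Dict (Int × Int) Int) (k : Int × Int) (c : Int)
    (f : (Int × Int) → Int) (hnd : d.keys.Nodup) :
    pvWsum ((d.insert k (d.getD k 0 + c)).items) f = pvWsum d.items f + c * f k := by
  by_cases hc : d.contains k = true
  · obtain ⟨v, hv⟩ : ∃ v, d.get? k = some v := by
      rw [PySem.Dict.contains_eq_isSome_get?] at hc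
      exact Option.isSome_iff_exists.mp hc
    rw [PySem.Dict.getD_of_get?_eq_some d 0 hv]
    rw [PySem.Dict.items_insert_of_contains d _ hc]
    exact pvWsum_map_update d.items k v c f (pvKeysNodup_map d hnd)
      (PySem.Dict.mem_items_of_get?_eq_some d hv)
  · rw [PySem.Dict.getD_of_not_contains d 0 (by simpa using hc)]
    rw [PySem.Dict.items_insert_of_not_contains d _ (by simpa using hc)]
    simp [pvWsum]

-- per-entry contribution of one outer-loop step, as a function of the key
def pvG (cond : Bool) (f : (Int × Int) → Int) (key : Int × Int) : Int :=
  f (min (key.1 + 1) 3, key.2) + (if key.1 ≥ 3 ∧ cond = true then f (0, min (key.2 + 1) 1) else 0)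

theorem pvFold_wsum (cond : Bool) (f : (Int × Int) → Int) :
    ∀ (entries : List ((Int × Int) × Int)) (acc : PySem.Dict (Int × Int) Int), acc.keys.Nodup →
    pvWsum (entries.foldl (fun nxt p =>
      let k1 : Int × Int := (min (p.1.1 + 1) 3, p.1.2)
      let nxt1 := nxt.insert k1 (nxt.getD k1 0 + p.2)
      if p.1.1 ≥ 3 ∧ cond = true then
        let k2 : Int × Int := (0, min (p.1.2 + 1) 1)
        nxt1.insert k2 (nxt1.getD k2 0 + p.2)
      else nxt1) acc).items f = pvWsum acc.items f + pvWsum entries (pvG cond f) := by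
  intro entries
  induction entries with
  | nil => intro acc h; simp [pvWsum]
  | cons p t ih =>
    intro acc hnd
    simp only [List.foldl_cons]
    have hps : pvWsum (p :: t) (pvG cond f)
        = p.2 * (f (min (p.1.1 + 1) 3, p.1.2)
            + (if p.1.1 ≥ 3 ∧ cond = true then f (0, min (p.1.2 + 1) 1) else 0))
          + pvWsum t (pvG cond f) := by
      simp only [pvWsum, List.map_cons, List.sum_cons, pvG]
    rw [hps]
    by_cases hcnd : p.1.1 ≥ 3 ∧ cond = true
    · rw [if_pos hcnd, if_pos hcnd]
      rw [ih _ (PySem.Dict.nodup_keys_insert _ _ _ (PySem.Dict.nodup_keys_insert _ _ _ hnd))]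
      rw [pvWsum_insert_add _ _ _ _ (PySem.Dict.nodup_keys_insert _ _ _ hnd)]
      rw [pvWsum_insert_add _ _ _ _ hnd]
      ring
    · rw [if_neg hcnd, if_neg hcnd]
      rw [ih _ (PySem.Dict.nodup_keys_insert _ _ _ hnd)]
      rw [pvWsum_insert_add _ _ _ _ hnd]
      ring

theorem pvStep_wsum (string : String) (j : Int) (st : PySem.Dict (Int × Int) Int)
    (f : (Int × Int) → Int) :
    pvWsum (pvStep string j st).items f = pvWsum st.items (pvG (pvNV string j) f) := by
  unfold pvStep
  rw [pvFold_wsum (pvNV string j) f st.items PySem.Dict.empty PySem.Dict.nodup_keys_empty]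
  have he : (PySem.Dict.empty : PySem.Dict (Int × Int) Int).items = [] := rfl
  rw [he]
  simp [pvWsum]

theorem pvLoop (string : String) (a : Int) (st : PySem.Dict (Int × Int) Int) :
    pvWsum (((PySem.List.pyRange a (PySem.Str.len string - 1) 1).foldl
        (fun st j => pvStep string j st) st)).items
        (fun key => if key.1 ≥ 3 ∧ key.2 = 0 then 1 else 0)
      = pvWsum st.items (fun key => pvC string a key.1 key.2) := by
  by_cases hb : a ≥ PySem.Str.len string - 1
  · rw [PySem.List.pyRange_one_eq_nil (by omega)]
    simp only [List.foldl_nil]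
    apply pvWsum_congr
    intro key
    rw [pvC, if_pos hb]
  · rw [PySem.List.pyRange_one_cons (by omega), List.foldl_cons]
    rw [pvLoop string (a + 1) (pvStep string a st)]
    rw [pvStep_wsum]
    apply pvWsum_congr
    intro key
    simp [pvG]
    conv_rhs => rw [pvC]
    rw [if_neg hb]
termination_by (PySem.Str.len string - 1 - a).toNat
decreasing_by all_goals omega

theorem pvFinal (l : List ((Int × Int) × Int)) : ∀ t0 : Int,
    l.foldl (fun t p => if p.1.1 ≥ 3 ∧ p.1.2 = 0 then t + p.2 else t) t0
      = t0 + pvWsum l (fun key => if key.1 ≥ 3 ∧ key.2 = 0 then 1 else 0) := by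
  induction l with
  | nil => intro t0; simp [pvWsum]
  | cons p t ih =>
    intro t0
    simp only [List.foldl_cons]
    rw [ih]
    have hps : pvWsum (p :: t) (fun key => if key.1 ≥ 3 ∧ key.2 = 0 then 1 else 0)
        = p.2 * (if p.1.1 ≥ 3 ∧ p.1.2 = 0 then 1 else 0)
          + pvWsum t (fun key => if key.1 ≥ 3 ∧ key.2 = 0 then 1 else 0) := by
      simp only [pvWsum, List.map_cons, List.sum_cons]
    rw [hps]
    by_cases h : p.1.1 ≥ 3 ∧ p.1.2 = 0
    · rw [if_pos h, if_pos h]; ring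
    · rw [if_neg h, if_neg h]; ring

theorem pvB_eq_pvC (string : String) (i length u ans r : Int) :
    Solution_alt string i length u ans r = (ans + 1) * pvC string i (min length 3) (min (u - r) 1) := by
  unfold Solution_alt
  rw [pvFinal, pvLoop, zero_add]
  have hi : (PySem.Dict.empty.insert (min length 3, min (u - r) 1) (1 : Int)).items
      = [((min length 3, min (u - r) 1), 1)] := by
    rw [PySem.Dict.items_insert_of_not_contains PySem.Dict.empty _ (by rfl)]
    rfl
  rw [hi]
  simp [pvWsum]

-- ===== VERDICT (by name: the statement is the Claim_ definition above) =====
theorem Solution_spec : Claim_equal_Solution := by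
  intro string i length u ans r _hD hP
  unfold Spec_Solution
  rw [pvA_eq_pvC string i length u ans r hP, pvB_eq_pvC]
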